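-- pv_equiv track=rewrite | github.com/middledoor0421/bird_sahi_temporal | scripts2/eval_video_kpi2.py | first_run_start
-- ===== SOURCE A (Python) =====
-- from typing import Any, Dict, List, Optional, Tuple
--
-- def first_run_start(hit_seq: List[int], n: int) -> Optional[int]:
--     """Return the first index where n consecutive hits start."""
--     if n <= 0:
--         return 0
--     cur = 0
--     start = 0
--     for idx, v in enumerate(hit_seq):
--         if v == 1:
--             if cur == 0:
--                 start = idx
--             cur += 1
--             if cur >= n:
--                 return start
--         else:
--             cur = 0
--     return None
-- ===== SOURCE B (Python) =====
-- def first_run_start(hit_seq, n):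
--     """Return the first index where n consecutive hits start."""
--     if n <= 0:
--         return 0
--     if n > len(hit_seq):
--         return None
--     s = ''.join('1' if v == 1 else '0' for v in hit_seq)
--     pos = s.find('1' * n)
--     return pos if pos != -1 else None
-- ===== Notes on version B (the rewrite author's own statement) =====
-- stated objective: idiomatic
-- what changed: Replaced the explicit run-length state machine (cur/start counters) by an early None when n exceeds len(hit_seq), then a bitstring of the hits and str.find of '1'*n, mapping find's -1 to None.
import Mathlib
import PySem

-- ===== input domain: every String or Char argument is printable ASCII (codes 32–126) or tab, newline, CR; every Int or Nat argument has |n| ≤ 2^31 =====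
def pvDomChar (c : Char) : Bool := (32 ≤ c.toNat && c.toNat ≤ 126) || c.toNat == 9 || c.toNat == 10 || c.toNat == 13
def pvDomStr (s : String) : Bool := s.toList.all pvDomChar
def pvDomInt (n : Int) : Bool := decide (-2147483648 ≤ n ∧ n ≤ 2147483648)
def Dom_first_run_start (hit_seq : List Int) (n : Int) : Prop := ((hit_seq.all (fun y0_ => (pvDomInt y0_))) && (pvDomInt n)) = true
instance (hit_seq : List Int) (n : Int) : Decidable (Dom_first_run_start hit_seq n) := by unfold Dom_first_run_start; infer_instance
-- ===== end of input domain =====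

-- B replaces A's run-length state machine by a bitstring + substring search ('1'*n via find); idiomatic, same return values.

-- ===== PORT A =====
def frsLoop (n : Int) : List Int → Int → Int → Int → Option Int
  | [], _, _, _ => none
  | v :: rest, idx, cur, start =>
    if v == 1 then
      let start' := if cur == 0 then idx else start
      let cur' := cur + 1
      if cur' ≥ n then some start'
      else frsLoop n rest (idx + 1) cur' start'
    else frsLoop n rest (idx + 1) 0 start

def first_run_start (hit_seq : List Int) (n : Int) : Option Int :=
  if n ≤ 0 then some 0
  else frsLoop n hit_seq 0 0 0

-- ===== PORT B =====
def first_run_start_alt (hit_seq : List Int) (n : Int) : Option Int :=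
  if n ≤ 0 then some 0
  else if n > (hit_seq.length : Int) then none
  else
    let s : List Char := hit_seq.map (fun v => if v == 1 then '1' else '0')
    let pos : Int := PySem.Chars.find s (List.replicate n.toNat '1')
    if pos ≠ -1 then some pos else none

-- ===== PRECONDITION & SPEC =====
def Spec_first_run_start (hit_seq : List Int) (n : Int) (out : Option Int) : Prop := out = first_run_start_alt hit_seq n
instance (hit_seq : List Int) (n : Int) (out : Option Int) : Decidable (Spec_first_run_start hit_seq n out) := by unfold Spec_first_run_start; infer_instance

-- ===== CLAIM (what is proved, stated in full; the proofs are below) =====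
def Claim_equal_first_run_start : Prop := ∀ (hit_seq : List Int) (n : Int), Dom_first_run_start hit_seq n → Spec_first_run_start hit_seq n (first_run_start hit_seq n)

-- ===== LEMMAS AND PROOFS =====

-- find returns j when sub is a prefix at j and at no earlier index.
theorem find_eq_of_first (s sub : List Char) (j : Nat)
    (hj : sub <+: s.drop j) (hmin : ∀ i, i < j → ¬ sub <+: s.drop i) :
    PySem.Chars.find s sub = (j : Int) := by
  have hinf : sub <:+: s := by
    rw [← PySem.Chars.isIn_iff_infix, ← PySem.Chars.exists_prefix_drop_iff_isIn]
    exact ⟨j, hj⟩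
  have hnn : 0 ≤ PySem.Chars.find s sub := (PySem.Chars.find_nonneg_iff s sub).mpr hinf
  obtain ⟨hpre, hm⟩ := PySem.Chars.find_spec hnn
  rcases Nat.lt_trichotomy (PySem.Chars.find s sub).toNat j with h | h | h
  · exact absurd hpre (hmin _ h)
  · omega
  · exact absurd hj (hm j h)

theorem find_zero_of_prefix (s sub : List Char) (h : sub <+: s) :
    PySem.Chars.find s sub = 0 := by
  have := find_eq_of_first s sub 0 (by simpa using h) (by omega)
  simpa using this

theorem prefix_replicate_get (m : Nat) (u : List Char)
    (h : List.replicate m '1' <+: u) (k : Nat) (hk : k < m) :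
    u[k]? = some '1' := by
  obtain ⟨t, ht⟩ := h
  subst ht
  rw [List.getElem?_append_left (by simpa using hk)]
  simp [hk]

-- no run of m ones can start at or before the '0' separator
theorem no_occ_early (c m : Nat) (t : List Char) (hcm : c < m) (i : Nat) (hi : i ≤ c) :
    ¬ List.replicate m '1' <+: (List.replicate c '1' ++ '0' :: t).drop i := by
  intro h
  have hdrop : (List.replicate c '1' ++ '0' :: t).drop i
      = List.replicate (c - i) '1' ++ '0' :: t := by
    rw [List.drop_append]
    simp [List.drop_replicate, Nat.sub_eq_zero_of_le hi]
  rw [hdrop] at h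
  have h1 := prefix_replicate_get m _ h (c - i) (by omega)
  rw [List.getElem?_append_right (by simp)] at h1
  simp at h1

theorem drop_past_sep (c q : Nat) (t : List Char) :
    (List.replicate c '1' ++ '0' :: t).drop (c + 1 + q) = t.drop q := by
  rw [List.drop_append]
  simp [List.drop_replicate, Nat.sub_eq_zero_of_le, List.drop_succ_cons,
    Nat.add_assoc, Nat.add_comm 1 q]

theorem drop_past_sep' (c j : Nat) (t : List Char) (h : c < j) :
    (List.replicate c '1' ++ '0' :: t).drop j = t.drop (j - c - 1) := by
  obtain ⟨k, rfl⟩ : ∃ k, j = c + 1 + k := ⟨j - c - 1, by omega⟩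
  rw [drop_past_sep]
  congr 1
  omega

-- searching for m ones across a '0' separator reduces to searching the tail
theorem find_skip (c m : Nat) (t : List Char) (hcm : c < m) :
    PySem.Chars.find (List.replicate c '1' ++ '0' :: t) (List.replicate m '1')
      = (if PySem.Chars.find t (List.replicate m '1') = -1 then -1
         else (c : Int) + 1 + PySem.Chars.find t (List.replicate m '1')) := by
  set sub := List.replicate m '1' with hsub
  set s := List.replicate c '1' ++ '0' :: t with hs
  by_cases hq : PySem.Chars.find t sub = -1
  · rw [if_pos hq]
    rw [PySem.Chars.find_eq_neg_one_iff]
    intro hinf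
    rw [← PySem.Chars.isIn_iff_infix, ← PySem.Chars.exists_prefix_drop_iff_isIn] at hinf
    obtain ⟨j, hj⟩ := hinf
    by_cases hjc : j ≤ c
    · exact no_occ_early c m t hcm j hjc hj
    · have hj' : sub <+: t.drop (j - c - 1) := by
        rwa [hs, drop_past_sep' c j t (by omega)] at hj
      have : sub <:+: t := by
        rw [← PySem.Chars.isIn_iff_infix, ← PySem.Chars.exists_prefix_drop_iff_isIn]
        exact ⟨_, hj'⟩
      exact (PySem.Chars.find_ne_neg_one_iff t sub).mpr this hq
  · rw [if_neg hq]
    have hnn : 0 ≤ PySem.Chars.find t sub := by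
      have := PySem.Chars.neg_one_le_find t sub
      omega
    obtain ⟨hpre, hm⟩ := PySem.Chars.find_spec hnn
    have heq := find_eq_of_first s sub (c + 1 + (PySem.Chars.find t sub).toNat)
      (by rw [hs, drop_past_sep]; exact hpre)
      (by
        intro i hi hp
        by_cases hic : i ≤ c
        · exact no_occ_early c m t hcm i hic hp
        · rw [hs, drop_past_sep' c i t (by omega)] at hp
          exact hm (i - c - 1) (by omega) hp)
    rw [heq]
    omega

theorem frsLoop_cons (n v idx cur st : Int) (rest : List Int) :
    frsLoop n (v :: rest) idx cur st =
      (if v == 1 then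
        (if cur + 1 ≥ n then some (if cur == 0 then idx else st)
         else frsLoop n rest (idx + 1) (cur + 1) (if cur == 0 then idx else st))
      else frsLoop n rest (idx + 1) 0 st) := rfl

-- loop invariant: frsLoop with c pending ones equals find on the padded suffix
theorem frsLoop_eq (m : Nat) (n : Int) (hmn : (m : Int) = n) :
    ∀ (l : List Int) (c : Nat) (idx st : Int), c < m → (c = 0 ∨ st = idx - c) →
    frsLoop n l idx (c : Int) st =
      (let p := PySem.Chars.find
          (List.replicate c '1' ++ l.map (fun v => if v == 1 then '1' else '0'))
          (List.replicate m '1')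
       if p = -1 then none else some (idx - c + p)) := by
  intro l
  induction l with
  | nil =>
    intro c idx st hc _
    have hfind : PySem.Chars.find (List.replicate c '1') (List.replicate m '1') = -1 := by
      rw [PySem.Chars.find_eq_neg_one_iff]
      intro h
      have := h.length_le
      simp at this
      omega
    simp [frsLoop, hfind]
  | cons v rest ih =>
    intro c idx st hc hst
    by_cases hv : v = 1
    · have hvb : (v == 1) = true := by simp [hv]
      have hmap : (v :: rest).map (fun v => if v == 1 then '1' else '0')
          = '1' :: rest.map (fun v => if v == 1 then '1' else '0') := by simp [hv]
      have hsplit : List.replicate c '1' ++ '1' :: rest.map (fun v => if v == 1 then '1' else '0')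
          = List.replicate (c + 1) '1' ++ rest.map (fun v => if v == 1 then '1' else '0') := by
        rw [List.replicate_succ' (n := c)]
        simp
      have hstart : (if (c : Int) == 0 then idx else st) = idx - c := by
        by_cases h0 : c = 0
        · subst h0; simp
        · rcases hst with h | h
          · exact absurd h h0
          · have hcne : ((c : Int) == 0) = false := by
              simp
              exact_mod_cast h0
            rw [hcne]
            simp [h]
      rw [frsLoop_cons, if_pos hvb, hstart]
      by_cases hdone : (c : Int) + 1 ≥ n
      · have hcm : c + 1 = m := by omega
        have hfind : PySem.Chars.find
            (List.replicate c '1' ++ (v :: rest).map (fun v => if v == 1 then '1' else '0'))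
            (List.replicate m '1') = 0 := by
          rw [hmap, hsplit, ← hcm]
          exact find_zero_of_prefix _ _ ⟨_, rfl⟩
        rw [if_pos hdone]
        simp only [hfind]
        norm_num
      · have hcm : c + 1 < m := by omega
        rw [if_neg hdone]
        rw [show ((c : Int) + 1) = ((c + 1 : Nat) : Int) by push_cast; ring]
        rw [ih (c + 1) (idx + 1) (idx - c) hcm (Or.inr (by push_cast; ring))]
        simp only [hmap, hsplit]
        by_cases hp : PySem.Chars.find
            (List.replicate (c + 1) '1' ++ rest.map (fun v => if v == 1 then '1' else '0'))
            (List.replicate m '1') = -1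
        · simp only [if_pos hp]
        · simp only [if_neg hp]
          congr 1
          push_cast
          ring
    · have hvb : ¬ ((v == 1) = true) := by simp [hv]
      have hmap : (v :: rest).map (fun v => if v == 1 then '1' else '0')
          = '0' :: rest.map (fun v => if v == 1 then '1' else '0') := by
        simp [hv]
      rw [frsLoop_cons, if_neg hvb]
      have hih := ih 0 (idx + 1) st (by omega) (Or.inl rfl)
      simp only [Nat.cast_zero, List.replicate_zero, List.nil_append] at hih
      rw [hih]
      simp only [hmap, find_skip c m _ hc]
      by_cases hq : PySem.Chars.find
          (rest.map (fun v => if v == 1 then '1' else '0')) (List.replicate m '1') = -1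
      · simp only [if_pos hq]
        norm_num
      · have hnn : 0 ≤ PySem.Chars.find
            (rest.map (fun v => if v == 1 then '1' else '0')) (List.replicate m '1') := by
          have := PySem.Chars.neg_one_le_find
            (rest.map (fun v => if v == 1 then '1' else '0')) (List.replicate m '1')
          omega
        simp only [if_neg hq, if_neg (show ¬((c : Int) + 1 +
            PySem.Chars.find (rest.map (fun v => if v == 1 then '1' else '0'))
              (List.replicate m '1') = -1) by omega)]
        congr 1
        ring

-- ===== VERDICT (by name: the statement is the Claim_ definition above) =====
theorem first_run_start_spec : Claim_equal_first_run_start := by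
  intro hit_seq n _
  unfold Spec_first_run_start first_run_start first_run_start_alt
  by_cases hn : n ≤ 0
  · simp [hn]
  · rw [if_neg hn, if_neg hn]
    have hmn : ((n.toNat : Int)) = n := Int.toNat_of_nonneg (by omega)
    have h0 := frsLoop_eq n.toNat n hmn hit_seq 0 0 0 (by omega) (Or.inl rfl)
    simp only [Nat.cast_zero, List.replicate_zero, List.nil_append] at h0
    rw [h0]
    by_cases hlen : n > (hit_seq.length : Int)
    · have hp : PySem.Chars.find
          (hit_seq.map (fun v => if v == 1 then '1' else '0')) (List.replicate n.toNat '1') = -1 := by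
        rw [PySem.Chars.find_eq_neg_one_iff]
        intro h
        have := h.length_le
        simp at this
        omega
      simp only [if_pos hp, if_pos hlen]
    · rw [if_neg hlen]
      by_cases hp : PySem.Chars.find
          (hit_seq.map (fun v => if v == 1 then '1' else '0')) (List.replicate n.toNat '1') = -1
      · simp only [if_pos hp, if_neg (show ¬¬PySem.Chars.find
          (hit_seq.map (fun v => if v == 1 then '1' else '0')) (List.replicate n.toNat '1') = -1
          from not_not_intro hp)]
      · simp only [if_neg hp, if_pos hp, zero_sub, neg_zero, zero_add]
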